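-- pv_equiv track=rewrite | github.com/AdamZhouSE/pythonHomework | Code/CodeRecords/2134/60634/269156.py | pigAndTry
-- ===== SOURCE A (Python) =====
-- def pigAndTry(x, t):
--     if x == 1:
--         return t + 1
--     elif t == 1:
--         return int(pow(2,x))
--     else:
--         groups = int(pow(2, x))
--         num = 0
--         num += ((groups - 1) * pigAndTry(x - 1, t - 1))
--         num += pigAndTry(x, t - 1)
--         return num
-- ===== SOURCE B (Python) =====
-- def pigAndTry(x, t):
--     if x == 1:
--         return t + 1
--     # bottom-up DP over rounds: row[j] holds the value for (x - j, round)
--     def ipow2(y):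
--         return (1 << y) if y >= 0 else 0   # == int(pow(2, y))
--     row = [2 if x - j == 1 else ipow2(x - j) for j in range(t)]
--     for tp in range(2, t + 1):
--         row = [tp + 1 if x - j == 1 else (ipow2(x - j) - 1) * row[j + 1] + row[j]
--                for j in range(t - tp + 1)]
--     return row[0]
-- ===== Notes on version B (the rewrite author's own statement) =====
-- stated objective: alternative
-- what changed: replaced A's exponential binary recursion over (x,t) with a bottom-up DP that keeps one row of values (x-j, round) and iterates the rounds, so each state is computed once; intended as faster (A timed out already at n=16 in a timing run, but no clean ratio could be measured)
import Mathlib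
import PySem

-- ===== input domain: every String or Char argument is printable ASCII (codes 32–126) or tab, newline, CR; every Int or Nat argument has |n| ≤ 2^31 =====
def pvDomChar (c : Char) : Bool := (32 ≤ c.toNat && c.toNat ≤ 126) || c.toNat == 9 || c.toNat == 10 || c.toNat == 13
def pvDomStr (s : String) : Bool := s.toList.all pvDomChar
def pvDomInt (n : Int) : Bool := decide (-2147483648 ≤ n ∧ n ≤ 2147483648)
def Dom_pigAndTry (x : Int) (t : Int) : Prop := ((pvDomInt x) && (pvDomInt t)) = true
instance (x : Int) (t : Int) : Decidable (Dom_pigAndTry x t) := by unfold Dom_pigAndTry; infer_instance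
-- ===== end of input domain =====

-- B replaces A's binary recursion by a bottom-up DP over rounds (one row of values per round), computing each state once.

-- ===== PORT A =====
-- int(pow(2, x)): an exact power of two for x ≥ 0; for x < 0, pow returns a float in (0,1)
-- (or 0.0) and int(...) truncates it to 0 — exact on all Int inputs.
def ipow2A (x : Int) : Int := if 0 ≤ x then 2 ^ x.toNat else 0

-- A's recursion descends by 1 in t at every recursive call; on inputs where the Python
-- returns (x = 1 or t ≥ 1) the fuel t.toNat is never exhausted, so this is a faithful port there.
def pigAndTryAux : Nat → Int → Int → Int
  | fuel, x, t =>
    if x = 1 then t + 1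
    else if t = 1 then ipow2A x
    else
      match fuel with
      | 0 => 0  -- unreachable under Pre_ (Python recurses forever / RecursionError there)
      | fuel + 1 =>
        let groups := ipow2A x
        (groups - 1) * pigAndTryAux fuel (x - 1) (t - 1) + pigAndTryAux fuel x (t - 1)

def pigAndTry (x : Int) (t : Int) : Int := pigAndTryAux t.toNat x t

-- ===== PORT B =====
-- (1 << y) if y >= 0 else 0
def ipow2B (y : Int) : Int := if 0 ≤ y then 2 ^ y.toNat else 0

-- row = [2 if x - j == 1 else ipow2(x - j) for j in range(t)]
def bInit (x t : Int) : List Int :=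
  (PySem.List.pyRange 0 t 1).map (fun j => if x - j = 1 then 2 else ipow2B (x - j))

-- one iteration of the 'for tp' loop: the new comprehension built from the previous row
def bStep (x t : Int) (row : List Int) (tp : Int) : List Int :=
  (PySem.List.pyRange 0 (t - tp + 1) 1).map
    (fun j => if x - j = 1 then tp + 1
              else (ipow2B (x - j) - 1) * PySem.List.pyGetD row (j + 1) 0
                   + PySem.List.pyGetD row j 0)

def pigAndTry_alt (x : Int) (t : Int) : Int :=
  if x = 1 then t + 1
  else PySem.List.pyGetD ((PySem.List.pyRange 2 (t + 1) 1).foldl (bStep x t) (bInit x t)) 0 0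
  -- row[0]; the row is nonempty whenever t ≥ 1

-- ===== PRECONDITION & SPEC =====
-- Pre_ excludes exactly the inputs where the Python A does not return: for x ≠ 1 and t < 1
-- neither base case is ever reached and A recurses forever (RecursionError).
def Pre_pigAndTry (x : Int) (t : Int) : Prop := x = 1 ∨ 1 ≤ t
instance (x : Int) (t : Int) : Decidable (Pre_pigAndTry x t) := by unfold Pre_pigAndTry; infer_instance
def pvWitness_pigAndTry : Int × Int := (3, 4)

def Spec_pigAndTry (x : Int) (t : Int) (out : Int) : Prop := out = pigAndTry_alt x t
instance (x : Int) (t : Int) (out : Int) : Decidable (Spec_pigAndTry x t out) := by unfold Spec_pigAndTry; infer_instance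

-- ===== CLAIM (what is proved, stated in full; the proofs are below) =====
def Claim_equal_pigAndTry : Prop := ∀ (x : Int) (t : Int), Dom_pigAndTry x t → Pre_pigAndTry x t → Spec_pigAndTry x t (pigAndTry x t)

-- ===== LEMMAS AND PROOFS =====

theorem ipow2B_eq_A (y : Int) : ipow2B y = ipow2A y := rfl

-- the recurrence of A in fuel-free form (f x t := pigAndTry x t), for t ≥ 2
theorem pigAndTry_step (x t : Int) (hx : x ≠ 1) (ht : 2 ≤ t) :
    pigAndTry x t = (ipow2A x - 1) * pigAndTry (x - 1) (t - 1) + pigAndTry x (t - 1) := by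
  unfold pigAndTry
  have h : t.toNat = (t - 1).toNat + 1 := by omega
  rw [h, pigAndTryAux]
  have ht1 : t ≠ 1 := by omega
  simp only [hx, ht1, if_false]

theorem pigAndTry_base1 (x t : Int) (hx : x = 1) : pigAndTry x t = t + 1 := by
  unfold pigAndTry; rw [pigAndTryAux.eq_def]; simp [hx]

theorem pigAndTry_baseT (x : Int) : pigAndTry x 1 = ipow2A x := by
  unfold pigAndTry
  rw [pigAndTryAux.eq_def]
  by_cases hx : x = 1 <;> simp [hx, ipow2A]

-- the row after processing rounds 2..m equals the values of A at round m
theorem row_invariant (x t : Int) (m : Int) (hm1 : 1 ≤ m) :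
    (PySem.List.pyRange 2 (m + 1) 1).foldl (bStep x t) (bInit x t)
    = (PySem.List.pyRange 0 (t - m + 1) 1).map (fun j => pigAndTry (x - j) m) := by
  induction m, hm1 using Int.le_induction with
  | base =>
    rw [PySem.List.pyRange_one_eq_nil (a := 2) (b := 1 + 1) (by omega)]
    unfold bInit
    simp only [List.foldl_nil]
    have : t - 1 + 1 = t := by omega
    rw [this]
    apply List.map_congr_left
    intro j hj
    have hj' := (PySem.List.mem_pyRange_one).1 hj
    by_cases h1 : x - j = 1
    · simp only [h1, if_true]
      rw [pigAndTry_base1 1 1 rfl]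
      norm_num
    · simp [h1, pigAndTry_baseT, ipow2B_eq_A]
  | succ m hm ihm =>
    rw [PySem.List.pyRange_one_succ_right (by omega), List.foldl_append, ihm,
        List.foldl_cons, List.foldl_nil]
    unfold bStep
    apply List.map_congr_left
    intro j hj
    have hj' := (PySem.List.mem_pyRange_one).1 hj
    by_cases h1 : x - j = 1
    · simp only [h1, if_true]
      rw [pigAndTry_base1 1 (m + 1) rfl]
    · simp only [h1, if_false]
      rw [PySem.List.pyGetD_map_pyRange_of_nonneg _ _ _ _ (by omega) (by omega),
          PySem.List.pyGetD_map_pyRange_of_nonneg _ _ _ _ (by omega) (by omega)]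
      rw [pigAndTry_step (x - j) (m + 1) h1 (by omega)]
      have hxj : x - (j + 1) = x - j - 1 := by ring
      have hms : m + 1 - 1 = m := by ring
      rw [hxj, hms, ipow2B_eq_A]

-- ===== VERDICT (by name: the statement is the Claim_ definition above) =====
theorem pigAndTry_spec : Claim_equal_pigAndTry := by
  intro x t _ hpre
  unfold Spec_pigAndTry pigAndTry_alt
  by_cases hx : x = 1
  · rw [if_pos hx, pigAndTry_base1 x t hx]
  · rw [if_neg hx]
    have ht : 1 ≤ t := by rcases hpre with h | h; exact absurd h hx; exact h
    rw [row_invariant x t t (by omega)]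
    rw [PySem.List.pyGetD_map_pyRange_of_nonneg _ _ _ _ (by omega) (by omega)]
    simp
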